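-- pv_equiv track=rewrite | github.com/fataltes/ComputationalBiology_549 | hw2/intron_exon.py | transcribe_dna2rna
-- ===== SOURCE A (Python) =====
-- def transcribe_dna2rna(dna, introns):
--     exon = ""
--     i = 0
--     skip = 0
--     while i < len(dna):
--         skip = 0
--         for intron in introns:
--             j = 0
--             while j < len(intron) and i+j < len(dna) and dna[i+j] == intron[j]:
--                 j+=1
--             if j == len(intron):
--                 skip = max(skip, len(intron))
--         if skip:
--             i+=(skip)
--         else:
--             exon += dna[i].replace('T', 'U')
--             i+=1
--     return exon
-- ===== SOURCE B (Python) =====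
-- def transcribe_dna2rna(dna, introns):
--     # One pass with an implicit trie: a set of all intron prefixes lets us find
--     # the longest intron matching at a position without scanning the intron list.
--     full = set(introns)
--     prefixes = set()
--     for t in introns:
--         for j in range(len(t) + 1):
--             prefixes.add(t[:j])
--     out = []
--     i = 0
--     n = len(dna)
--     while i < n:
--         best = 0
--         cur = ""
--         j = 0
--         while True:
--             if cur in full and len(cur) > best:
--                 best = len(cur)
--             if i + j >= n:
--                 break
--             nxt = cur + dna[i + j]
--             if nxt not in prefixes:
--                 break
--             cur = nxt
--             j += 1
--         if best:
--             i += best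
--         else:
--             c = dna[i]
--             out.append('U' if c == 'T' else c)
--             i += 1
--     return ''.join(out)
-- ===== Notes on version B (the rewrite author's own statement) =====
-- stated objective: faster
-- what changed: B precomputes the set of all intron prefixes (an implicit trie) once, then finds the longest intron matching at each position by a single incremental walk instead of A's rescan of the whole intron list with character-by-character comparison at every position.
import Mathlib
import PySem

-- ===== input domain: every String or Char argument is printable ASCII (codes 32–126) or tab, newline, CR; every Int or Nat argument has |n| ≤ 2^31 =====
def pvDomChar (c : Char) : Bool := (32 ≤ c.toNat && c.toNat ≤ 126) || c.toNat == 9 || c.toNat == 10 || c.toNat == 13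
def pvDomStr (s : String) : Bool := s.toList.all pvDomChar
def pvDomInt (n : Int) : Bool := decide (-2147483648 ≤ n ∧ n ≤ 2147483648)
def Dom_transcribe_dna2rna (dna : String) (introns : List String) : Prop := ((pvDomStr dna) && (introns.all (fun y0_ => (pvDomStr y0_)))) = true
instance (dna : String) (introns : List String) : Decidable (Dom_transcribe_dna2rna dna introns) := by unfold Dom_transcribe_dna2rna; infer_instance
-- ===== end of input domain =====

-- B replaces A's per-position scan over the intron list by a one-pass scan over a
-- precomputed set of all intron prefixes (an implicit trie); equivalence of the
-- RETURN value is proved for all inputs (both programs are total).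

-- ===== PORT A =====
-- inner 'while j < len(intron) and i+j < len(dna) and dna[i+j] == intron[j]'
def commonPrefixLen : List Char → List Char → Nat
  | a :: as, b :: bs => if a = b then commonPrefixLen as bs + 1 else 0
  | _, _ => 0

-- 'for intron in introns: … if j == len(intron): skip = max(skip, len(intron))'
def aSkip (introns : List (List Char)) (rest : List Char) : Nat :=
  introns.foldl (fun s t => if commonPrefixLen t rest = t.length then max s t.length else s) 0

-- outer 'while i < len(dna)' as structural recursion on the suffix of dna at i
def aGo (introns : List (List Char)) : List Char → List Char
  | [] => []
  | c :: cs =>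
    let skip := aSkip introns (c :: cs)
    if _h : skip ≠ 0 then aGo introns ((c :: cs).drop skip)
    else (if c = 'T' then 'U' else c) :: aGo introns cs
termination_by rest => rest.length
decreasing_by
  all_goals simp only [List.length_drop, List.length_cons]; omega

def transcribe_dna2rna (dna : String) (introns : List String) : String :=
  String.mk (aGo (introns.map String.toList) dna.toList)

-- ===== PORT B =====
-- 'full = set(introns)'; 'prefixes = {t[:j] for t in introns for j in range(len(t)+1)}'
def bPrefixes (introns : List (List Char)) : PySem.Set (List Char) :=
  introns.foldl
    (fun s t => (List.range (t.length + 1)).foldl (fun s j => PySem.Set.add s (t.take j)) s)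
    PySem.Set.empty

-- the inner 'while True' walk: cur grows one char at a time while it stays a prefix
def bWalk (full prefixes : PySem.Set (List Char)) : List Char → List Char → Nat → Nat
  | cur, [], best =>
      if cur ∈ full ∧ best < cur.length then cur.length else best
  | cur, c :: cs, best =>
      let best' := if cur ∈ full ∧ best < cur.length then cur.length else best
      if (cur ++ [c]) ∈ prefixes then bWalk full prefixes (cur ++ [c]) cs best' else best'

-- outer 'while i < n' as structural recursion on the suffix of dna at i
def bGo (full prefixes : PySem.Set (List Char)) : List Char → List Char
  | [] => []
  | c :: cs =>
    let best := bWalk full prefixes [] (c :: cs) 0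
    if _h : best ≠ 0 then bGo full prefixes ((c :: cs).drop best)
    else (if c = 'T' then 'U' else c) :: bGo full prefixes cs
termination_by rest => rest.length
decreasing_by
  all_goals simp only [List.length_drop, List.length_cons]; omega

def transcribe_dna2rna_alt (dna : String) (introns : List String) : String :=
  let ts := introns.map String.toList
  String.mk (bGo (PySem.Set.ofList ts) (bPrefixes ts) dna.toList)

-- ===== PRECONDITION & SPEC =====
def Spec_transcribe_dna2rna (dna : String) (introns : List String) (out : String) : Prop := out = transcribe_dna2rna_alt dna introns
instance (dna : String) (introns : List String) (out : String) : Decidable (Spec_transcribe_dna2rna dna introns out) := by unfold Spec_transcribe_dna2rna; infer_instance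

-- ===== CLAIM (what is proved, stated in full; the proofs are below) =====
def Claim_equal_transcribe_dna2rna : Prop := ∀ (dna : String) (introns : List String), Dom_transcribe_dna2rna dna introns → Spec_transcribe_dna2rna dna introns (transcribe_dna2rna dna introns)

-- ===== LEMMAS AND PROOFS =====

-- A's inner loop tests exactly "intron is a prefix of the rest of dna"
theorem commonPrefixLen_eq_length_iff (t r : List Char) :
    commonPrefixLen t r = t.length ↔ t <+: r := by
  induction t generalizing r with
  | nil => simp [commonPrefixLen]
  | cons a as ih =>
    cases r with
    | nil => simp [commonPrefixLen]
    | cons b bs =>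
      by_cases hab : a = b
      · subst hab
        simp [commonPrefixLen, List.cons_prefix_cons, ih]
      · simp [commonPrefixLen, hab, List.cons_prefix_cons]

-- membership in a fold of Set.add
theorem mem_inner_fold (t : List Char) (s : PySem.Set (List Char)) (u : List Char) :
    u ∈ (List.range (t.length + 1)).foldl (fun s j => PySem.Set.add s (t.take j)) s ↔
      u ∈ s ∨ u <+: t := by
  rw [PySem.Set.mem_foldl_add]
  constructor
  · rintro (h | ⟨j, _, rfl⟩)
    · exact Or.inl h
    · exact Or.inr (List.take_prefix j t)
  · rintro (h | h)
    · exact Or.inl h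
    · refine Or.inr ⟨u.length, ?_, (List.prefix_iff_eq_take.mp h)⟩
      simp [List.mem_range]
      have := h.length_le
      omega

theorem mem_bPrefixes_aux (ts : List (List Char)) (s : PySem.Set (List Char)) (u : List Char) :
    u ∈ ts.foldl
        (fun s t => (List.range (t.length + 1)).foldl (fun s j => PySem.Set.add s (t.take j)) s) s ↔
      u ∈ s ∨ ∃ t ∈ ts, u <+: t := by
  induction ts generalizing s with
  | nil => simp
  | cons t ts ih =>
    simp only [List.foldl_cons, ih, mem_inner_fold]
    constructor
    · rintro ((h | h) | ⟨t', ht', hp⟩)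
      · exact Or.inl h
      · exact Or.inr ⟨t, by simp, h⟩
      · exact Or.inr ⟨t', by simp [ht'], hp⟩
    · rintro (h | ⟨t', ht', hp⟩)
      · exact Or.inl (Or.inl h)
      · rcases List.mem_cons.mp ht' with rfl | h'
        · exact Or.inl (Or.inr hp)
        · exact Or.inr ⟨t', h', hp⟩

theorem mem_bPrefixes (ts : List (List Char)) (u : List Char) :
    u ∈ bPrefixes ts ↔ ∃ t ∈ ts, u <+: t := by
  unfold bPrefixes
  rw [mem_bPrefixes_aux]
  simp [PySem.Set.empty]

-- splitting off the contribution of one fixed element cur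
theorem bestOf_or_eq (ts : List (List Char)) (q : List Char → Prop) [DecidablePred q]
    (cur : List Char) (b : Nat) :
    ts.foldl (fun s t => if q t ∨ t = cur then max s t.length else s) b =
      ts.foldl (fun s t => if q t then max s t.length else s)
        (if cur ∈ ts then max b cur.length else b) := by
  induction ts generalizing b with
  | nil => simp
  | cons t ts ih =>
    simp only [List.foldl_cons]
    by_cases hc : t = cur
    · subst hc
      have htriv : (q t ∨ t = t) := Or.inr rfl
      rw [if_pos htriv, ih]
      by_cases hq : q t
      · simp only [hq, if_pos, List.mem_cons, true_or, if_pos]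
        by_cases hm : t ∈ ts <;>
          simp [hm]
      · simp only [hq, if_neg, not_false_iff, List.mem_cons, true_or, if_pos]
        by_cases hm : t ∈ ts <;> simp [hm]
    · have hcond : (q t ∨ t = cur) ↔ q t := by simp [hc]
      rw [if_congr hcond rfl rfl, ih]
      have hmem : (cur ∈ t :: ts) ↔ cur ∈ ts := by simp [List.mem_cons, Ne.symm hc]
      by_cases hq : q t
      · simp only [hq, if_pos]
        by_cases hm : cur ∈ ts
        · simp [hm, hmem.mpr, Nat.max_assoc, Nat.max_comm cur.length]
        · simp [hm, hmem]
      · simp only [hq, if_neg, not_false_iff]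
        by_cases hm : cur ∈ ts <;> simp [hm, hmem]

-- fold congruence over the members
theorem bestOf_congr (ts : List (List Char)) (q₁ q₂ : List Char → Prop)
    [DecidablePred q₁] [DecidablePred q₂] (b : Nat)
    (h : ∀ t ∈ ts, q₁ t ↔ q₂ t) :
    ts.foldl (fun s t => if q₁ t then max s t.length else s) b =
      ts.foldl (fun s t => if q₂ t then max s t.length else s) b := by
  induction ts generalizing b with
  | nil => rfl
  | cons t ts ih =>
    simp only [List.foldl_cons]
    rw [if_congr (h t (by simp)) rfl rfl]
    exact ih _ (fun t' ht' => h t' (by simp [ht']))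

-- fold under an always-false condition
theorem bestOf_false (ts : List (List Char)) (q : List Char → Prop) [DecidablePred q]
    (b : Nat) (h : ∀ t ∈ ts, ¬ q t) :
    ts.foldl (fun s t => if q t then max s t.length else s) b = b := by
  induction ts generalizing b with
  | nil => rfl
  | cons t ts ih =>
    simp only [List.foldl_cons, if_neg (h t (by simp))]
    exact ih _ (fun t' ht' => h t' (by simp [ht']))

-- a strict extension of cur inside cur ++ c :: cs starts with cur ++ [c]
theorem extension_step (cur t : List Char) (c : Char) (cs : List Char)
    (h₁ : cur <+: t) (h₂ : t <+: cur ++ c :: cs) (hne : t ≠ cur) :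
    (cur ++ [c]) <+: t := by
  obtain ⟨v, rfl⟩ := h₁
  have hv : v <+: c :: cs := (List.prefix_append_right_inj cur).mp h₂
  cases v with
  | nil => simp at hne
  | cons d v' =>
    rcases List.cons_prefix_cons.mp hv with ⟨rfl, -⟩
    exact ⟨v', by simp⟩

-- main characterisation of B's trie walk
theorem bWalk_eq (ts : List (List Char)) (rem cur : List Char) (best : Nat) :
    bWalk (PySem.Set.ofList ts) (bPrefixes ts) cur rem best =
      ts.foldl (fun s t => if cur <+: t ∧ t <+: cur ++ rem then max s t.length else s) best := by
  induction rem generalizing cur best with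
  | nil =>
    have h : ∀ t ∈ ts, (cur <+: t ∧ t <+: cur ++ ([] : List Char)) ↔ (False ∨ t = cur) := by
      intro t _
      simp only [List.append_nil, false_or]
      constructor
      · rintro ⟨h₁, h₂⟩
        exact h₂.eq_of_length (Nat.le_antisymm h₂.length_le h₁.length_le)
      · rintro rfl; exact ⟨List.prefix_refl _, List.prefix_refl _⟩
    rw [bestOf_congr _ _ _ _ h, bestOf_or_eq,
        bestOf_false _ _ _ (fun _ _ => not_false)]
    simp only [bWalk, PySem.Set.mem_ofList]
    by_cases hm : cur ∈ ts
    · simp only [hm, if_pos, true_and]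
      by_cases hb : best < cur.length <;> [skip; skip] <;> simp [hb] <;> omega
    · simp [hm]
  | cons c cs ih =>
    have hsplit : ∀ t ∈ ts,
        (cur <+: t ∧ t <+: cur ++ c :: cs) ↔
          (((cur ++ [c]) <+: t ∧ t <+: (cur ++ [c]) ++ cs) ∨ t = cur) := by
      intro t _
      constructor
      · rintro ⟨h₁, h₂⟩
        by_cases hne : t = cur
        · exact Or.inr hne
        · exact Or.inl ⟨extension_step cur t c cs h₁ h₂ hne,
            by simpa [List.append_assoc] using h₂⟩
      · rintro (⟨h₁, h₂⟩ | rfl)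
        · exact ⟨((List.prefix_append cur [c]).trans h₁),
            by simpa [List.append_assoc] using h₂⟩
        · exact ⟨List.prefix_refl _, List.prefix_append _ _⟩
    rw [bestOf_congr _ _ _ _ hsplit, bestOf_or_eq]
    simp only [bWalk, PySem.Set.mem_ofList]
    by_cases hp : (cur ++ [c]) ∈ bPrefixes ts
    · rw [if_pos hp, ih]
      congr 1
      by_cases hm : cur ∈ ts
      · simp only [hm, if_pos, true_and]
        by_cases hb : best < cur.length <;> simp [hb] <;> omega
      · simp [hm]
    · rw [if_neg hp]
      have hnone : ∀ t ∈ ts, ¬ ((cur ++ [c]) <+: t ∧ t <+: (cur ++ [c]) ++ cs) := by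
        rintro t ht ⟨h₁, -⟩
        exact hp ((mem_bPrefixes ts (cur ++ [c])).mpr ⟨t, ht, h₁⟩)
      rw [bestOf_false _ _ _ hnone]
      by_cases hm : cur ∈ ts
      · simp only [hm, if_pos, true_and]
        by_cases hb : best < cur.length <;> simp [hb] <;> omega
      · simp [hm]

-- hence the two per-position skip amounts agree
theorem skip_eq (ts : List (List Char)) (rest : List Char) :
    bWalk (PySem.Set.ofList ts) (bPrefixes ts) [] rest 0 = aSkip ts rest := by
  rw [bWalk_eq]
  unfold aSkip
  exact bestOf_congr _ _ _ _ (fun t _ => by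
    simp [commonPrefixLen_eq_length_iff, List.nil_prefix])

-- and the two outer loops agree
theorem go_eq (ts : List (List Char)) : ∀ (n : Nat) (rest : List Char), rest.length ≤ n →
    aGo ts rest = bGo (PySem.Set.ofList ts) (bPrefixes ts) rest := by
  intro n
  induction n with
  | zero =>
    intro rest h
    have : rest = [] := List.eq_nil_of_length_eq_zero (Nat.le_zero.mp h)
    subst this; simp [aGo, bGo]
  | succ n ih =>
    intro rest h
    cases rest with
    | nil => simp [aGo, bGo]
    | cons c cs =>
      rw [aGo, bGo, skip_eq]
      by_cases hs : aSkip ts (c :: cs) ≠ 0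
      · rw [dif_pos hs, dif_pos hs]
        exact ih _ (by simp only [List.length_drop, List.length_cons]; simp at h; omega)
      · rw [dif_neg hs, dif_neg hs, ih cs (by simp at h; omega)]

-- ===== VERDICT (by name: the statement is the Claim_ definition above) =====
theorem transcribe_dna2rna_spec : Claim_equal_transcribe_dna2rna := by
  intro dna introns _
  unfold Spec_transcribe_dna2rna transcribe_dna2rna transcribe_dna2rna_alt
  rw [go_eq (introns.map String.toList) dna.toList.length dna.toList (Nat.le_refl _)]
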